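-- pv_equiv track=rewrite | github.com/bspaans/python-mingus | extra/tunings.py | fingers_needed
-- ===== SOURCE A (Python) =====
-- def fingers_needed(fingering):
--     """Return the number of fingers needed to play the given fingering."""
--     split = False # True if an open string must be played, thereby making any
--                   # subsequent strings impossible to bar with the index finger
--     indexfinger = False # True if the index finger was already accounted for
--                         # in the count
--     minimum = min(finger for finger in fingering if finger) # the index finger
--                                                             # plays the lowest
--                                                             # finger position
--     result = 0
--     for finger in reversed(fingering):
--         if finger == 0: # an open string is played
--             split = True # subsequent strings are impossible to bar with the
--                          # index finger
--         else:
--             if not split and finger == minimum: # if an open string hasn't been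
--                                                 # played and this is a job for
--                                                 # the index finger:
--                 if not indexfinger: # if the index finger hasn't been accounted
--                                     # for:
--                     result += 1
--                     indexfinger = True # index finger has now been accounted for
--             else:
--                 result += 1
--     return result
-- ===== SOURCE B (Python) =====
-- def fingers_needed(fingering):
--     """Return the number of fingers needed to play the given fingering."""
--     minimum = min(finger for finger in fingering if finger)
--     cut = 0  # index just after the last open string; region fingering[cut:] can be barred
--     for i, finger in enumerate(fingering):
--         if finger == 0:
--             cut = i + 1
--     barred = fingering[cut:].count(minimum)
--     total = sum(1 for finger in fingering if finger)
--     return total - barred + (1 if barred else 0)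
-- ===== Notes on version B (the rewrite author's own statement) =====
-- stated objective: simpler
-- what changed: Replaces A's reversed-traversal two-flag state machine with a forward scan locating the last open string and direct arithmetic counting (total nonzero fingers minus barred minimum positions after the last open string, collapsed to one index finger).
import Mathlib
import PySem

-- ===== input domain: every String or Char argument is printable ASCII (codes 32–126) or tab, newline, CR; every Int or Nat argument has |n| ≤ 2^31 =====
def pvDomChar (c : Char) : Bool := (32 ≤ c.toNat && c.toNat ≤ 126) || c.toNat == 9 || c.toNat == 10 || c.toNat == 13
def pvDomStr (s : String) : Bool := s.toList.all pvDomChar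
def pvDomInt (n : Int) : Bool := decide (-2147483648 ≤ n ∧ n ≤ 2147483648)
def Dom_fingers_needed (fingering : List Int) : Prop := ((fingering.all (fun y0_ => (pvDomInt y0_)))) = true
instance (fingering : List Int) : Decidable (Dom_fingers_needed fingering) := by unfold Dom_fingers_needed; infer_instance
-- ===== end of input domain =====

-- B replaces A's reversed two-flag state machine by a forward scan for the last open string plus
-- arithmetic counting (objective: simpler). A raises ValueError (min of empty sequence) when no
-- finger is nonzero; those inputs are excluded by Pre_.

-- ===== PORT A =====
-- A's loop body: state (split, indexfinger, result)
def pvStepA (minimum : Int) (s : Bool × Bool × Int) (finger : Int) : Bool × Bool × Int :=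
  if finger = 0 then (true, s.2.1, s.2.2)
  else if s.1 = false ∧ finger = minimum then
    (if s.2.1 = false then (s.1, true, s.2.2 + 1) else s)
  else (s.1, s.2.1, s.2.2 + 1)

def fingers_needed (fingering : List Int) : Int :=
  match PySem.List.min? (fingering.filter (fun finger => finger ≠ 0)) (fun x => x) with
  | none => 0  -- Python raises ValueError here; outside Pre_
  | some minimum =>
    (fingering.reverse.foldl (pvStepA minimum) (false, false, 0)).2.2

-- ===== PORT B =====
-- B's first loop: index just past the last open string
def pvCut (fingering : List Int) : Int :=
  (PySem.List.enumerate fingering 0).foldl (fun c p => if p.2 = 0 then p.1 + 1 else c) 0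

def fingers_needed_alt (fingering : List Int) : Int :=
  match PySem.List.min? (fingering.filter (fun finger => finger ≠ 0)) (fun x => x) with
  | none => 0  -- Python raises ValueError here; outside Pre_
  | some minimum =>
    let cut := pvCut fingering
    let barred : Int := PySem.List.count (PySem.List.slice fingering (some cut) none) minimum
    let total : Int := ((fingering.filter (fun finger => finger ≠ 0)).length : Int)
    total - barred + (if barred ≠ 0 then 1 else 0)

-- ===== PRECONDITION & SPEC =====
-- Pre_ excludes exactly the inputs (no nonzero finger) on which A raises ValueError.
def Pre_fingers_needed (fingering : List Int) : Prop := ∃ f ∈ fingering, f ≠ 0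
instance (fingering : List Int) : Decidable (Pre_fingers_needed fingering) := by
  unfold Pre_fingers_needed; infer_instance
def pvWitness_fingers_needed : List Int := [1, 0, 2]

def Spec_fingers_needed (fingering : List Int) (out : Int) : Prop := out = fingers_needed_alt fingering
instance (fingering : List Int) (out : Int) : Decidable (Spec_fingers_needed fingering out) := by
  unfold Spec_fingers_needed; infer_instance

-- ===== CLAIM (what is proved, stated in full; the proofs are below) =====
def Claim_equal_fingers_needed : Prop := ∀ (fingering : List Int), Dom_fingers_needed fingering → Pre_fingers_needed fingering → Spec_fingers_needed fingering (fingers_needed fingering)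

-- ===== LEMMAS AND PROOFS =====

-- abbreviations used by the loop characterisation
def pvNZ (l : List Int) : Int := ((l.countP (fun f => f ≠ 0)) : Int)
def pvMins (m : Int) (l : List Int) : Int := ((l.takeWhile (fun f => f ≠ 0)).count m : Int)

lemma pvNZ_cons_zero (t : List Int) : pvNZ (0 :: t) = pvNZ t := by simp [pvNZ]
lemma pvNZ_cons {x : Int} (t : List Int) (hx : x ≠ 0) : pvNZ (x :: t) = pvNZ t + 1 := by
  simp [pvNZ, hx]
lemma pvMins_cons_zero (m : Int) (t : List Int) : pvMins m (0 :: t) = 0 := by simp [pvMins]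
lemma pvMins_cons_eq {m : Int} (t : List Int) (hx : m ≠ 0) : pvMins m (m :: t) = pvMins m t + 1 := by
  simp [pvMins, hx]
lemma pvMins_cons_ne {x m : Int} (t : List Int) (hx : x ≠ 0) (hm : x ≠ m) :
    pvMins m (x :: t) = pvMins m t := by
  simp [pvMins, hx, hm]
lemma pvMins_nonneg (m : Int) (t : List Int) : 0 ≤ pvMins m t := by
  unfold pvMins; exact Int.natCast_nonneg _

lemma loopA_split (m : Int) (rl : List Int) : ∀ idx r,
    (rl.foldl (pvStepA m) (true, idx, r)).2.2 = r + pvNZ rl := by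
  induction rl with
  | nil => intro idx r; simp [pvNZ]
  | cons x t ih =>
    intro idx r
    by_cases hx : x = 0
    · have hstep : pvStepA m (true, idx, r) x = (true, idx, r) := by simp [pvStepA, hx]
      rw [List.foldl_cons, hstep, ih, hx, pvNZ_cons_zero]
    · have hstep : pvStepA m (true, idx, r) x = (true, idx, r + 1) := by
        simp [pvStepA, hx]
      rw [List.foldl_cons, hstep, ih, pvNZ_cons t hx]; ring

lemma loopA_idx (m : Int) (rl : List Int) : ∀ r,
    (rl.foldl (pvStepA m) (false, true, r)).2.2 = r + pvNZ rl - pvMins m rl := by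
  induction rl with
  | nil => intro r; simp [pvNZ, pvMins]
  | cons x t ih =>
    intro r
    by_cases hx : x = 0
    · have hstep : pvStepA m (false, true, r) x = (true, true, r) := by simp [pvStepA, hx]
      rw [List.foldl_cons, hstep, loopA_split, hx, pvNZ_cons_zero, pvMins_cons_zero]; ring
    · by_cases hm : x = m
      · subst hm
        have hstep : pvStepA x (false, true, r) x = (false, true, r) := by
          simp [pvStepA, hx]
        rw [List.foldl_cons, hstep, ih, pvNZ_cons t hx, pvMins_cons_eq t hx]; ring
      · have hstep : pvStepA m (false, true, r) x = (false, true, r + 1) := by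
          simp [pvStepA, hx, hm]
        rw [List.foldl_cons, hstep, ih, pvNZ_cons t hx, pvMins_cons_ne t hx hm]; ring

lemma loopA_main (m : Int) (rl : List Int) : ∀ r,
    (rl.foldl (pvStepA m) (false, false, r)).2.2 =
      r + pvNZ rl - pvMins m rl + (if pvMins m rl ≠ 0 then 1 else 0) := by
  induction rl with
  | nil => intro r; simp [pvNZ, pvMins]
  | cons x t ih =>
    intro r
    by_cases hx : x = 0
    · have hstep : pvStepA m (false, false, r) x = (true, false, r) := by simp [pvStepA, hx]
      rw [List.foldl_cons, hstep, loopA_split, hx, pvNZ_cons_zero, pvMins_cons_zero]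
      simp
    · by_cases hm : x = m
      · subst hm
        have hstep : pvStepA x (false, false, r) x = (false, true, r + 1) := by
          simp [pvStepA, hx]
        rw [List.foldl_cons, hstep, loopA_idx, pvNZ_cons t hx, pvMins_cons_eq t hx]
        have h1 := pvMins_nonneg x t
        split_ifs with h <;> omega
      · have hstep : pvStepA m (false, false, r) x = (false, false, r + 1) := by
          simp [pvStepA, hx, hm]
        rw [List.foldl_cons, hstep, ih, pvNZ_cons t hx, pvMins_cons_ne t hx hm]
        split_ifs <;> ring

-- B's cut loop characterisation: the slice after the last 0 is the reversed zero-free suffix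
lemma cut_spec (l : List Int) :
    0 ≤ pvCut l ∧ pvCut l ≤ l.length ∧
      l.drop (pvCut l).toNat = ((l.reverse.takeWhile (fun f => f ≠ 0))).reverse := by
  induction l using List.reverseRecOn with
  | nil => simp [pvCut]
  | append_singleton t x ih =>
    have hfold : pvCut (t ++ [x]) = if x = 0 then (t.length : Int) + 1 else pvCut t := by
      simp [pvCut, PySem.List.enumerate_append]
    obtain ⟨h0, hle, hdrop⟩ := ih
    by_cases hx : x = 0
    · subst hx
      rw [hfold, if_pos rfl]
      refine ⟨by omega, by simp, ?_⟩
      have : ((t.length : Int) + 1).toNat = t.length + 1 := by omega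
      simp [this]
    · rw [hfold, if_neg hx]
      refine ⟨h0, by simp; omega, ?_⟩
      rw [List.drop_append_of_le_length (by omega)]
      simp [hx, hdrop]

theorem fingers_needed_eq (l : List Int) : fingers_needed l = fingers_needed_alt l := by
  unfold fingers_needed fingers_needed_alt
  cases hmin : PySem.List.min? (l.filter (fun finger => finger ≠ 0)) (fun x => x) with
  | none => rfl
  | some m =>
    obtain ⟨h0, hle, hdrop⟩ := cut_spec l
    show (l.reverse.foldl (pvStepA m) (false, false, 0)).2.2 =
      ((l.filter (fun finger => finger ≠ 0)).length : Int)
        - (PySem.List.count (PySem.List.slice l (some (pvCut l)) none) m : Int)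
        + (if (PySem.List.count (PySem.List.slice l (some (pvCut l)) none) m : Int) ≠ 0 then 1 else 0)
    rw [loopA_main, PySem.List.count_eq, PySem.List.slice_from _ h0, hdrop, List.count_reverse]
    rw [show pvNZ l.reverse = pvNZ l from by simp [pvNZ, List.countP_reverse]]
    simp only [pvNZ, pvMins, List.countP_eq_length_filter]
    split_ifs <;> simp_all

-- ===== VERDICT (by name: the statement is the Claim_ definition above) =====
theorem fingers_needed_spec : Claim_equal_fingers_needed := by
  intro fingering _ _
  unfold Spec_fingers_needed
  exact fingers_needed_eq fingering
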